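-- pv_equiv track=rewrite | github.com/ambertyn/ActiveLearning | scripts/make_spacy_data.py | iob_to_spans
-- ===== SOURCE A (Python) =====
-- def iob_to_spans(tokens, tags, tag_names):
--     """
--     Convert token-level IOB tags to spans in character offsets.
--     Returns: (text, spans_as_offsets) where spans are (start_char, end_char, label)
--     """
--     # Reconstruct text with single spaces between tokens (simple and consistent)
--     # Also track token start/end char offsets in this reconstructed text
--     starts = []
--     ends = []
--     parts = []
--     pos = 0
--     for tok in tokens:
--         if parts:
--             parts.append(" ")
--             pos += 1
--         starts.append(pos)
--         parts.append(tok)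
--         pos += len(tok)
--         ends.append(pos)
--     text = "".join(parts)
--
--     spans = []
--     i = 0
--     while i < len(tokens):
--         tag = tag_names[tags[i]]
--         if tag.startswith("B-"):
--             label = tag[2:]
--             j = i + 1
--             while j < len(tokens) and tag_names[tags[j]] == f"I-{label}":
--                 j += 1
--             span_start = starts[i]
--             span_end = ends[j - 1]
--             spans.append((span_start, span_end, label))
--             i = j
--         else:
--             i += 1
--
--     return text, spans
-- ===== SOURCE B (Python) =====
-- def iob_to_spans(tokens, tags, tag_names):
--     # Phase 1 unchanged: reconstruct text and token char offsets.
--     starts = []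
--     ends = []
--     parts = []
--     pos = 0
--     for tok in tokens:
--         if parts:
--             parts.append(" ")
--             pos += 1
--         starts.append(pos)
--         parts.append(tok)
--         pos += len(tok)
--         ends.append(pos)
--     text = "".join(parts)
--
--     # Phase 2: single pass maintaining the currently open entity (label, start_char);
--     # a span is flushed whenever the contiguous run breaks.
--     spans = []
--     open_ent = None
--     for i in range(len(tokens)):
--         tag = tag_names[tags[i]]
--         if tag.startswith("B-"):
--             if open_ent is not None:
--                 lab, sc = open_ent
--                 spans.append((sc, ends[i - 1], lab))
--             open_ent = (tag[2:], starts[i])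
--         elif open_ent is not None and tag == "I-" + open_ent[0]:
--             pass
--         else:
--             if open_ent is not None:
--                 lab, sc = open_ent
--                 spans.append((sc, ends[i - 1], lab))
--             open_ent = None
--     if open_ent is not None:
--         lab, sc = open_ent
--         spans.append((sc, ends[-1], lab))
--     return text, spans
-- ===== Notes on version B (the rewrite author's own statement) =====
-- stated objective: simpler
-- what changed: Replaces A's nested while-loops (outer index loop with an inner scan consuming each entity) by a single for-loop over token indices that maintains the currently open entity (label, start_char) and flushes it whenever the run breaks; phase 1 (text/offset reconstruction) is unchanged.
import Mathlib
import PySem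

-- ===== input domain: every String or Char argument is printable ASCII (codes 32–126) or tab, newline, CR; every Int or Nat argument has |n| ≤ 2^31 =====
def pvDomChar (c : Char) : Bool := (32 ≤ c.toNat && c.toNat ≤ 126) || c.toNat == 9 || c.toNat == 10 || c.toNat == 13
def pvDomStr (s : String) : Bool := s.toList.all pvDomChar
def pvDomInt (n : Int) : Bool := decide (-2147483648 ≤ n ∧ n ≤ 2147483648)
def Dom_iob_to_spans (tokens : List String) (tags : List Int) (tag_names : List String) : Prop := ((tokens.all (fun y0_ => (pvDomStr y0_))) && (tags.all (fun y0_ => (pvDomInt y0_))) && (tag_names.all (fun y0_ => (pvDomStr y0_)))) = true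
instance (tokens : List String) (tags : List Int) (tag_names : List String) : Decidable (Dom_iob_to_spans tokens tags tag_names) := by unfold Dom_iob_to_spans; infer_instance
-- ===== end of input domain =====

-- B replaces A's nested while-loops over token indices by a single pass that
-- maintains the currently open entity (label, start_char) and flushes it when the
-- run breaks (objective: simpler decomposition; same asymptotic cost).
-- The while loops are ported with a fuel argument (fuel = number of tokens, always
-- sufficient); this is only a totality device, not a change of algorithm.

-- ===== PORT A =====
-- phase 1, shared verbatim by both Pythons: text reconstruction and char offsets
def pvPhase1 (tokens : List String) : List Int × List Int × List String × Int :=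
  tokens.foldl (fun st tok =>
    let p : List String × Int :=
      if st.2.2.1.isEmpty then (st.2.2.1, st.2.2.2) else (st.2.2.1 ++ [" "], st.2.2.2 + 1)
    (st.1 ++ [p.2], st.2.1 ++ [p.2 + (PySem.Str.len tok : Int)], p.1 ++ [tok],
      p.2 + (PySem.Str.len tok : Int)))
    ([], [], [], 0)

-- tag_names[tags[i]] (total form; Pre_ guarantees both indexings are in range)
def pvTagName (tags : List Int) (tag_names : List String) (i : Nat) : String :=
  PySem.List.pyGetD tag_names (PySem.List.pyGetD tags (i : Int) 0) ""

-- A's inner while: advance j while tag_names[tags[j]] == "I-"+label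
def pvInnerA (tags : List Int) (tag_names : List String) (n : Nat) (label : String) :
    Nat → Nat → Nat
  | 0, j => j
  | fuel + 1, j =>
    if j < n then
      if pvTagName tags tag_names j == "I-" ++ label then
        pvInnerA tags tag_names n label fuel (j + 1)
      else j
    else j

-- A's outer while over token index i
def pvOuterA (tags : List Int) (tag_names : List String) (starts ends : List Int) (n : Nat) :
    Nat → Nat → List (Int × Int × String) → List (Int × Int × String)
  | 0, _i, spans => spans
  | fuel + 1, i, spans =>
    if i < n then
      let tag := pvTagName tags tag_names i
      if PySem.Str.startswith tag "B-" then
        let label := PySem.Str.slice tag (some 2) none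
        let j := pvInnerA tags tag_names n label n (i + 1)
        pvOuterA tags tag_names starts ends n fuel j
          (spans ++ [(PySem.List.pyGetD starts (i : Int) 0,
                      PySem.List.pyGetD ends ((j : Int) - 1) 0, label)])
      else
        pvOuterA tags tag_names starts ends n fuel (i + 1) spans
    else spans

def iob_to_spans (tokens : List String) (tags : List Int) (tag_names : List String) :
    String × (List (Int × Int × String)) :=
  let st := pvPhase1 tokens
  (PySem.Str.join "" st.2.2.1,
   pvOuterA tags tag_names st.1 st.2.1 tokens.length tokens.length 0 [])

-- ===== PORT B =====
-- B's single for-loop with an accumulator: (spans, currently open entity)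
def pvGoB (tags : List Int) (tag_names : List String) (starts ends : List Int) (n : Nat) :
    Nat → Nat → List (Int × Int × String) → Option (String × Int) → List (Int × Int × String)
  | 0, _i, spans, openEnt =>
    match openEnt with
    | some (lab, sc) => spans ++ [(sc, PySem.List.pyGetD ends (-1) 0, lab)]
    | none => spans
  | fuel + 1, i, spans, openEnt =>
    if i < n then
      let tag := pvTagName tags tag_names i
      if PySem.Str.startswith tag "B-" then
        let spans' := match openEnt with
          | some (lab, sc) => spans ++ [(sc, PySem.List.pyGetD ends ((i : Int) - 1) 0, lab)]
          | none => spans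
        pvGoB tags tag_names starts ends n fuel (i + 1) spans'
          (some (PySem.Str.slice tag (some 2) none, PySem.List.pyGetD starts (i : Int) 0))
      else
        match openEnt with
        | some (lab, sc) =>
          if tag == "I-" ++ lab then
            pvGoB tags tag_names starts ends n fuel (i + 1) spans (some (lab, sc))
          else
            pvGoB tags tag_names starts ends n fuel (i + 1)
              (spans ++ [(sc, PySem.List.pyGetD ends ((i : Int) - 1) 0, lab)]) none
        | none => pvGoB tags tag_names starts ends n fuel (i + 1) spans none
    else
      match openEnt with
      | some (lab, sc) => spans ++ [(sc, PySem.List.pyGetD ends (-1) 0, lab)]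
      | none => spans

def iob_to_spans_alt (tokens : List String) (tags : List Int) (tag_names : List String) :
    String × (List (Int × Int × String)) :=
  let st := pvPhase1 tokens
  (PySem.Str.join "" st.2.2.1,
   pvGoB tags tag_names st.1 st.2.1 tokens.length tokens.length 0 [] none)

-- ===== PRECONDITION & SPEC =====
-- A raises IndexError when some used tag index is out of Python range for tag_names
-- or tags is shorter than tokens; Pre_ excludes exactly those inputs.
def Pre_iob_to_spans (tokens : List String) (tags : List Int) (tag_names : List String) : Prop :=
  tokens.length ≤ tags.length ∧
    ∀ t ∈ tags.take tokens.length, PySem.Raise.InRange tag_names.length t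
instance (tokens : List String) (tags : List Int) (tag_names : List String) :
    Decidable (Pre_iob_to_spans tokens tags tag_names) := by
  unfold Pre_iob_to_spans; infer_instance

def pvWitness_iob_to_spans : List String × List Int × List String :=
  (["John", "Smith", "works"], [1, 2, 0], ["O", "B-PER", "I-PER"])

def Spec_iob_to_spans (tokens : List String) (tags : List Int) (tag_names : List String)
    (out : String × (List (Int × Int × String))) : Prop :=
  out = iob_to_spans_alt tokens tags tag_names
instance (tokens : List String) (tags : List Int) (tag_names : List String)
    (out : String × (List (Int × Int × String))) : Decidable (Spec_iob_to_spans tokens tags tag_names out) := by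
  unfold Spec_iob_to_spans; infer_instance

-- ===== CLAIM (what is proved, stated in full; the proofs are below) =====
def Claim_equal_iob_to_spans : Prop := ∀ (tokens : List String) (tags : List Int) (tag_names : List String), Dom_iob_to_spans tokens tags tag_names → Pre_iob_to_spans tokens tags tag_names → Spec_iob_to_spans tokens tags tag_names (iob_to_spans tokens tags tag_names)

-- ===== LEMMAS AND PROOFS =====

-- a tag equal to "I-"++lab does not start with "B-"
theorem pvBI (tag lab : String) (h : tag = "I-" ++ lab) :
    PySem.Str.startswith tag "B-" = false := by
  subst h
  by_contra hc
  have h1 : PySem.Str.startswith ("I-" ++ lab) "B-" = true := by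
    cases hb : PySem.Str.startswith ("I-" ++ lab) "B-" with
    | true => rfl
    | false => exact absurd hb hc
  rw [PySem.Str.startswith_eq] at h1
  rw [PySem.Chars.startswith_iff] at h1
  have h2 : ("I-" ++ lab).toList = 'I' :: '-' :: lab.toList := by
    simp [String.toList_append]
  rw [h2] at h1
  have h3 : ("B-" : String).toList = ['B', '-'] := by decide
  rw [h3] at h1
  simp [List.cons_prefix_cons] at h1

theorem pv_ends_len : ∀ (tokens : List String) (init : List Int × List Int × List String × Int),
    ((tokens.foldl (fun st tok =>
      let p : List String × Int :=
        if st.2.2.1.isEmpty then (st.2.2.1, st.2.2.2) else (st.2.2.1 ++ [" "], st.2.2.2 + 1)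
      (st.1 ++ [p.2], st.2.1 ++ [p.2 + (PySem.Str.len tok : Int)], p.1 ++ [tok],
        p.2 + (PySem.Str.len tok : Int))) init).2.1).length = init.2.1.length + tokens.length := by
  intro tokens
  induction tokens with
  | nil => intro init; simp
  | cons tok rest ih =>
    intro init
    rw [List.foldl_cons, ih]
    simp
    omega

theorem pvPhase1_ends_len (tokens : List String) :
    ((pvPhase1 tokens).2.1).length = tokens.length := by
  unfold pvPhase1
  rw [pv_ends_len]
  simp

-- ends[-1] = ends[n-1] when ends has length n
theorem pv_last_eq (ends : List Int) (n : Nat) (hn : ends.length = n) :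
    PySem.List.pyGetD ends (-1) 0 = PySem.List.pyGetD ends ((n : Int) - 1) 0 := by
  cases n with
  | zero =>
    cases ends with
    | nil => simp [PySem.List.pyGetD]
    | cons a l => simp at hn
  | succ m =>
    have hne : ends ≠ [] := by intro h; subst h; simp at hn
    rw [PySem.List.pyGetD_neg_one ends 0 hne]
    have : ((m + 1 : Nat) : Int) - 1 = ((m : Nat) : Int) := by push_cast; ring
    rw [this]
    rw [PySem.List.pyGetD_eq_getElem (i := (m : Int)) ends 0 (by omega) (by omega)]
    simp [List.getLast_eq_getElem, hn]

-- the inner while does not move once j ≥ n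
theorem pvInner_stop (tags : List Int) (tag_names : List String) (n : Nat) (label : String)
    (f j : Nat) (h : n ≤ j) : pvInnerA tags tag_names n label f j = j := by
  cases f with
  | zero => rfl
  | succ f => rw [pvInnerA]; simp [Nat.not_lt.mpr h]

-- the inner while only moves forward
theorem pvInner_ge (tags : List Int) (tag_names : List String) (n : Nat) (label : String) :
    ∀ f j, j ≤ pvInnerA tags tag_names n label f j := by
  intro f
  induction f with
  | zero => intro j; simp [pvInnerA]
  | succ f ih =>
    intro j
    rw [pvInnerA]
    split
    · split
      · exact le_trans (Nat.le_succ j) (ih (j + 1))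
      · exact le_refl j
    · exact le_refl j

-- the inner while's result does not depend on (sufficient) fuel
theorem pvInner_fuel (tags : List Int) (tag_names : List String) (n : Nat) (label : String) :
    ∀ f f' j, n - j ≤ f → n - j ≤ f' →
      pvInnerA tags tag_names n label f j = pvInnerA tags tag_names n label f' j := by
  intro f
  induction f with
  | zero =>
    intro f' j hf hf'
    have h : n ≤ j := by omega
    rw [pvInner_stop tags tag_names n label 0 j h, pvInner_stop tags tag_names n label f' j h]
  | succ f ih =>
    intro f' j hf hf'
    by_cases hj : j < n
    · cases f' with
      | zero => omega
      | succ f' =>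
        rw [pvInnerA, pvInnerA]
        simp only [hj, if_true]
        split
        · exact ih f' (j + 1) (by omega) (by omega)
        · rfl
    · have h : n ≤ j := by omega
      rw [pvInner_stop tags tag_names n label _ j h, pvInner_stop tags tag_names n label f' j h]

-- A's outer loop does not move once i ≥ n
theorem pvOuter_stop (tags : List Int) (tag_names : List String) (starts ends : List Int)
    (n : Nat) (f i : Nat) (spans : List (Int × Int × String)) (h : n ≤ i) :
    pvOuterA tags tag_names starts ends n f i spans = spans := by
  cases f with
  | zero => rfl
  | succ f => rw [pvOuterA]; simp [Nat.not_lt.mpr h]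

-- the simultaneous invariant relating B's single pass to A's nested loops
theorem pvKey (tags : List Int) (tag_names : List String) (starts ends : List Int)
    (n : Nat) (hn : ends.length = n) :
    ∀ fb i, i ≤ n → n - i ≤ fb →
      ((∀ fa spans, n - i ≤ fa →
          pvGoB tags tag_names starts ends n fb i spans none =
            pvOuterA tags tag_names starts ends n fa i spans) ∧
       (∀ lab sc fa spans, n - pvInnerA tags tag_names n lab n i ≤ fa →
          pvGoB tags tag_names starts ends n fb i spans (some (lab, sc)) =
            pvOuterA tags tag_names starts ends n fa (pvInnerA tags tag_names n lab n i)
              (spans ++ [(sc,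
                PySem.List.pyGetD ends (((pvInnerA tags tag_names n lab n i : Nat) : Int) - 1) 0,
                lab)]))) := by
  intro fb
  induction fb with
  | zero =>
    intro i hi hk
    have hin : i = n := by omega
    subst hin
    constructor
    · intro fa spans _
      rw [pvGoB, pvOuter_stop tags tag_names starts ends i fa i spans (le_refl i)]
    · intro lab sc fa spans _
      have hstop : pvInnerA tags tag_names i lab i i = i :=
        pvInner_stop tags tag_names i lab i i (le_refl i)
      rw [pvGoB, hstop,
        pvOuter_stop tags tag_names starts ends i fa i _ (le_refl i),
        pv_last_eq ends i hn]
  | succ fb ih =>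
    intro i hi hk
    by_cases hlt : i < n
    · have hIH := ih (i + 1) (by omega) (by omega)
      constructor
      · intro fa spans hfa
        obtain ⟨fa', rfl⟩ : ∃ fa', fa = fa' + 1 := ⟨fa - 1, by omega⟩
        rw [pvGoB, pvOuterA]
        simp only [hlt, if_true]
        by_cases hB : PySem.Str.startswith (pvTagName tags tag_names i) "B-" = true
        · simp only [hB, if_true]
          exact hIH.2 _ _ _ _ (by
            have := pvInner_ge tags tag_names n
              (PySem.Str.slice (pvTagName tags tag_names i) (some 2) none) n (i + 1)
            omega)
        · simp only [Bool.not_eq_true] at hB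
          simp only [hB, Bool.false_eq_true, if_false]
          exact hIH.1 _ _ (by omega)
      · intro lab sc fa spans hfa
        rw [pvGoB]
        simp only [hlt, if_true]
        by_cases hB : PySem.Str.startswith (pvTagName tags tag_names i) "B-" = true
        · -- B- tag: both close the open span at ends[i-1]; A's inner loop stops at i
          have hne : (pvTagName tags tag_names i == "I-" ++ lab) = false := by
            cases h : (pvTagName tags tag_names i == "I-" ++ lab) with
            | false => rfl
            | true =>
              have := pvBI (pvTagName tags tag_names i) lab (by exact eq_of_beq h)
              rw [this] at hB; exact absurd hB (by simp)
          have hinner : pvInnerA tags tag_names n lab n i = i := by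
            cases n with
            | zero => omega
            | succ m => rw [pvInnerA]; simp [hlt, hne]
          rw [hinner] at hfa ⊢
          obtain ⟨fa', rfl⟩ : ∃ fa', fa = fa' + 1 := ⟨fa - 1, by omega⟩
          simp only [hB, if_true]
          rw [hIH.2 _ _ fa' _ (by
            have := pvInner_ge tags tag_names n
              (PySem.Str.slice (pvTagName tags tag_names i) (some 2) none) n (i + 1)
            omega)]
          conv_rhs => rw [pvOuterA]
          simp only [hlt, if_true, hB]
        · simp only [Bool.not_eq_true] at hB
          simp only [hB, Bool.false_eq_true, if_false]
          by_cases hI : (pvTagName tags tag_names i == "I-" ++ lab) = true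
          · -- matching I- tag: both just advance
            have hinner : pvInnerA tags tag_names n lab n i =
                pvInnerA tags tag_names n lab n (i + 1) := by
              cases n with
              | zero => omega
              | succ m =>
                conv_lhs => rw [pvInnerA]
                simp only [hlt, if_true, hI]
                exact pvInner_fuel tags tag_names (m + 1) lab m (m + 1) (i + 1)
                  (by omega) (by omega)
            rw [hinner] at hfa ⊢
            simp only [hI, if_true]
            exact hIH.2 _ _ _ _ hfa
          · -- mismatching tag: B flushes at ends[i-1]; A's inner loop stops at i
            simp only [Bool.not_eq_true] at hI
            have hinner : pvInnerA tags tag_names n lab n i = i := by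
              cases n with
              | zero => omega
              | succ m => rw [pvInnerA]; simp [hlt, hI]
            rw [hinner] at hfa ⊢
            obtain ⟨fa', rfl⟩ : ∃ fa', fa = fa' + 1 := ⟨fa - 1, by omega⟩
            simp only [hI, Bool.false_eq_true, if_false]
            rw [hIH.1 fa' _ (by omega)]
            conv_rhs => rw [pvOuterA]
            simp only [hlt, if_true, hB, Bool.false_eq_true, if_false]
    · have hin : i = n := by omega
      subst hin
      constructor
      · intro fa spans _
        rw [pvGoB]
        simp only [hlt, if_false]
        rw [pvOuter_stop tags tag_names starts ends i fa i spans (le_refl i)]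
      · intro lab sc fa spans _
        have hstop : pvInnerA tags tag_names i lab i i = i :=
          pvInner_stop tags tag_names i lab i i (le_refl i)
        rw [pvGoB]
        simp only [hlt, if_false]
        rw [hstop, pvOuter_stop tags tag_names starts ends i fa i _ (le_refl i),
          pv_last_eq ends i hn]

-- ===== VERDICT (by name: the statement is the Claim_ definition above) =====
theorem iob_to_spans_spec : Claim_equal_iob_to_spans := by
  intro tokens tags tag_names _ _
  unfold Spec_iob_to_spans iob_to_spans iob_to_spans_alt
  have hlen : ((pvPhase1 tokens).2.1).length = tokens.length := pvPhase1_ends_len tokens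
  have h := (pvKey tags tag_names (pvPhase1 tokens).1 (pvPhase1 tokens).2.1 tokens.length hlen
    tokens.length 0 (by omega) (by omega)).1 tokens.length [] (by omega)
  simp only []
  rw [h]
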